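-- pv_equiv track=rewrite | github.com/kokellab/hipsterplot | hipsterplot.py | _bin_generator
-- ===== SOURCE A (Python) =====
-- def _bin_generator(data, bin_ends):
-- 	""" Yields a list for each bin """
-- 	max_idx_end = len(bin_ends) - 1
-- 	iends = enumerate(bin_ends)
--
-- 	idx_end, value_end = next(iends)
-- 	bin_data = []
-- 	for el in sorted(data):
-- 		while el >= value_end and idx_end != max_idx_end:
-- 			yield bin_data
-- 			bin_data = []
-- 			idx_end, value_end = next(iends)
-- 		bin_data.append(el)
--
-- 	# Finish
-- 	for unused in iends:
-- 		yield bin_data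
-- 		bin_data = []
-- 	yield bin_data
-- ===== SOURCE B (Python) =====
-- def _bin_generator(data, bin_ends):
-- 	""" Yields a list for each bin """
-- 	rest = sorted(data)
-- 	for value_end in bin_ends[:-1]:
-- 		k = 0
-- 		while k < len(rest) and rest[k] < value_end:
-- 			k += 1
-- 		yield rest[:k]
-- 		rest = rest[k:]
-- 	yield rest
-- ===== Notes on version B (the rewrite author's own statement) =====
-- stated objective: simpler
-- what changed: Replaces A's element-major single pass (enumerate/next boundary iterator advanced inside the element loop, plus a separate tail-flush loop) with a boundary-major loop that repeatedly slices the sorted remainder at each cut point.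
import Mathlib
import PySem

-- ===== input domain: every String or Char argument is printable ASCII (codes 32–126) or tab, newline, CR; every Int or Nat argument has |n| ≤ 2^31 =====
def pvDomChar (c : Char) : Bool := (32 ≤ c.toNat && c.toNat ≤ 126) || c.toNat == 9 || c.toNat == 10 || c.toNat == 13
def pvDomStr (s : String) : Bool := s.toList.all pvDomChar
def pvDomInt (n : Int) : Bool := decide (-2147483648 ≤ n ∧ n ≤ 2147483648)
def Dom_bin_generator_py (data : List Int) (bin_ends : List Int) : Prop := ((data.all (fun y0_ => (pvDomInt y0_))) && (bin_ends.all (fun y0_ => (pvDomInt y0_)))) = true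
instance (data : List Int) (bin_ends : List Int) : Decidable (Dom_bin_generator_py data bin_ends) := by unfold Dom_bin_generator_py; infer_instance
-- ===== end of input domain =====

-- B replaces A's element-major merge walk (iterator of boundaries advanced inside the
-- element loop, plus a tail-flush loop) by a boundary-major loop that repeatedly slices
-- the sorted remainder; objective: simpler. Equivalence is about the returned bins.

-- ===== PORT A =====
-- the inner `while el >= value_end and idx_end != max_idx_end` loop; `idx_end != max_idx_end`
-- holds exactly while the enumerate iterator still has items, i.e. `rest ≠ []`.
-- state: (value_end, remaining ends, bin_data, yielded bins so far)
def pvWhileAdv (el : Int) (cur : Int) (rest : List Int) (bin : List Int)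
    (acc : List (List Int)) : Int × List Int × List Int × List (List Int) :=
  match rest with
  | [] => (cur, [], bin, acc)
  | v :: vs => if cur ≤ el then pvWhileAdv el v vs [] (acc ++ [bin]) else (cur, v :: vs, bin, acc)

-- the `for el in sorted(data)` loop, then the tail flush (`for unused in iends` + final yield)
def pvGoA : List Int → Int → List Int → List Int → List (List Int) → List (List Int)
  | [], _cur, rest, bin, acc => acc ++ bin :: List.replicate rest.length []
  | el :: tl, cur, rest, bin, acc =>
      match pvWhileAdv el cur rest bin acc with
      | (cur', rest', bin', acc') => pvGoA tl cur' rest' (bin' ++ [el]) acc'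

def bin_generator_py (data : List Int) (bin_ends : List Int) : List (List Int) :=
  match bin_ends with
  | [] => []  -- `next(iends)` raises StopIteration → RuntimeError; excluded by Pre_
  | e0 :: es => pvGoA (PySem.List.sorted data (fun x => x) false) e0 es [] []

-- ===== PORT B =====
-- `while k < len(rest) and rest[k] < value_end: k += 1`
def pvScanK (rest : List Int) (v : Int) (k : Nat) : Nat :=
  if h : k < rest.length then
    (if rest[k] < v then pvScanK rest v (k + 1) else k)
  else k
  termination_by rest.length - k

-- `for value_end in bin_ends[:-1]: … yield rest[:k]; rest = rest[k:]` then `yield rest`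
def pvGoB (rest : List Int) (ends : List Int) : List (List Int) :=
  match ends with
  | [] => [rest]
  | v :: vs =>
      let k := pvScanK rest v 0
      rest.take k :: pvGoB (rest.drop k) vs

def bin_generator_py_alt (data : List Int) (bin_ends : List Int) : List (List Int) :=
  pvGoB (PySem.List.sorted data (fun x => x) false) bin_ends.dropLast

-- ===== PRECONDITION & SPEC =====
-- Pre_ excludes only empty bin_ends, where A raises RuntimeError (next() on an exhausted iterator).
def Pre_bin_generator_py (data : List Int) (bin_ends : List Int) : Prop := bin_ends ≠ []
instance (data : List Int) (bin_ends : List Int) : Decidable (Pre_bin_generator_py data bin_ends) := by unfold Pre_bin_generator_py; infer_instance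

def pvWitness_bin_generator_py : List Int × List Int := ([3, 1, 2], [2, 4])

def Spec_bin_generator_py (data : List Int) (bin_ends : List Int) (out : List (List Int)) : Prop := out = bin_generator_py_alt data bin_ends
instance (data : List Int) (bin_ends : List Int) (out : List (List Int)) : Decidable (Spec_bin_generator_py data bin_ends out) := by unfold Spec_bin_generator_py; infer_instance

-- ===== CLAIM (what is proved, stated in full; the proofs are below) =====
def Claim_equal_bin_generator_py : Prop := ∀ (data : List Int) (bin_ends : List Int), Dom_bin_generator_py data bin_ends → Pre_bin_generator_py data bin_ends → Spec_bin_generator_py data bin_ends (bin_generator_py data bin_ends)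

-- ===== LEMMAS AND PROOFS =====
theorem pv_drop_length_takeWhile {α : Type} (p : α → Bool) (l : List α) :
    l.drop (l.takeWhile p).length = l.dropWhile p := by
  induction l with
  | nil => simp
  | cons a l ih => by_cases h : p a <;> simp [h, ih]

-- common shape: the bins, boundary-major, via takeWhile/dropWhile
def pvS (s : List Int) (cur : Int) (rest : List Int) : List (List Int) :=
  match rest with
  | [] => [s]
  | v :: vs => s.takeWhile (· < cur) :: pvS (s.dropWhile (· < cur)) v vs

theorem pvS_nil (cur : Int) (rest : List Int) :
    pvS [] cur rest = [] :: List.replicate rest.length [] := by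
  induction rest generalizing cur with
  | nil => simp [pvS]
  | cons v vs ih => simp [pvS, ih v, List.replicate_succ]

theorem pvGoA_eq (s : List Int) :
    ∀ (rest : List Int) (cur : Int) (bin : List Int) (acc : List (List Int)),
      pvGoA s cur rest bin acc = acc ++ (pvS s cur rest).modifyHead (bin ++ ·) := by
  induction s with
  | nil =>
    intro rest cur bin acc
    simp [pvGoA, pvS_nil, List.modifyHead]
  | cons el tl ih =>
    intro rest cur bin acc
    induction rest generalizing cur bin acc with
    | nil =>
      simp only [pvGoA, pvWhileAdv, ih [] cur (bin ++ [el]) acc, pvS, List.modifyHead]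
      simp
    | cons v vs ihr =>
      by_cases h : cur ≤ el
      · have : pvGoA (el :: tl) cur (v :: vs) bin acc
            = pvGoA (el :: tl) v vs [] (acc ++ [bin]) := by
          simp only [pvGoA, pvWhileAdv, if_pos h]
        rw [this, ihr v [] (acc ++ [bin])]
        have ht : (el :: tl).takeWhile (· < cur) = [] := by
          simp [not_lt.mpr h]
        have hd : (el :: tl).dropWhile (· < cur) = el :: tl := by
          simp [not_lt.mpr h]
        simp only [pvS, ht, hd, List.modifyHead]
        cases hS : pvS (el :: tl) v vs <;> simp [List.append_assoc]
      · have hlt : el < cur := not_le.mp h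
        have : pvGoA (el :: tl) cur (v :: vs) bin acc
            = pvGoA tl cur (v :: vs) (bin ++ [el]) acc := by
          simp only [pvGoA, pvWhileAdv, if_neg h]
        rw [this, ih (v :: vs) cur (bin ++ [el]) acc]
        simp only [pvS, List.takeWhile_cons, List.dropWhile_cons, hlt, decide_true,
          if_pos, List.modifyHead]
        simp [List.append_assoc]

theorem pvScanK_eq (rest : List Int) (v : Int) :
    ∀ k : Nat, pvScanK rest v k = k + ((rest.drop k).takeWhile (· < v)).length := by
  intro k
  induction hn : rest.length - k using Nat.strong_induction_on generalizing k with
  | _ n ihn =>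
  rw [pvScanK]
  by_cases h : k < rest.length
  · rw [dif_pos h]
    rw [List.drop_eq_getElem_cons h, List.takeWhile_cons]
    by_cases hv : rest[k] < v
    · rw [if_pos hv, ihn (rest.length - (k + 1)) (by omega) (k + 1) rfl]
      simp [hv]; omega
    · simp [hv]
  · rw [dif_neg h]
    rw [List.drop_of_length_le (by omega)]
    simp

theorem pvGoB_eq (es : List Int) :
    ∀ (s : List Int) (e0 : Int), pvGoB s ((e0 :: es).dropLast) = pvS s e0 es := by
  induction es with
  | nil => intro s e0; simp [pvGoB, pvS]
  | cons v vs ih =>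
    intro s e0
    have hk : pvScanK s e0 0 = (s.takeWhile (· < e0)).length := by
      simpa using pvScanK_eq s e0 0
    have hdl : (e0 :: v :: vs).dropLast = e0 :: (v :: vs).dropLast := by
      simp [List.dropLast]
    have h1 : s.take (s.takeWhile (· < e0)).length = s.takeWhile (· < e0) :=
      (List.prefix_iff_eq_take.mp (List.takeWhile_prefix _)).symm
    have h2 : s.drop (s.takeWhile (· < e0)).length = s.dropWhile (· < e0) :=
      pv_drop_length_takeWhile _ s
    rw [hdl]
    simp only [pvGoB, hk, h1, h2, pvS]
    rw [ih]

-- ===== VERDICT (by name: the statement is the Claim_ definition above) =====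
theorem bin_generator_py_spec : Claim_equal_bin_generator_py := by
  intro data bin_ends _hdom hpre
  cases bin_ends with
  | nil => exact absurd rfl hpre
  | cons e0 es =>
    show bin_generator_py data (e0 :: es) = bin_generator_py_alt data (e0 :: es)
    simp only [bin_generator_py, bin_generator_py_alt]
    rw [pvGoA_eq, pvGoB_eq]
    cases hS : pvS (PySem.List.sorted data (fun x => x) false) e0 es <;> simp [List.modifyHead]
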